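-- pv_equiv track=rewrite | github.com/saulsevilla/Dashboard_streamlit | streamlit_app.py | make_specs
-- ===== SOURCE A (Python) =====
-- def make_specs( rows : int, cols : int, n : int) -> dict:
--     """Makes the list of dictionaries to set the layout for the function make_subplots, especially for primes and specific grids.
--
--     Args:
--         rows (int): Number of rows for the grid
--         cols (int): Number of columns for the grid
--         n (int): Total number of figures
--
--     Returns:
--         dict: Grid for plotting
--     """
--     specs = []
--     for i in range(rows):
--         auxi = []
--         for j in range(cols):
--             if i*cols + j <= n:
--                 auxi.append({})
--             else:
--                 auxi.append(None)
--         specs.append(auxi)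
--     return specs
-- ===== SOURCE B (Python) =====
-- def make_specs(rows: int, cols: int, n: int) -> dict:
--     def row(i):
--         count = min(cols, max(0, n - i * cols + 1))
--         return [{} for _ in range(count)] + [None] * (cols - count)
--     return [row(i) for i in range(rows)]
-- ===== Notes on version B (the rewrite author's own statement) =====
-- stated objective: alternative
-- what changed: The per-cell conditional inside a nested loop is replaced by per-row boundary arithmetic: each row's count of dict cells is computed as min(cols, max(0, n - i*cols + 1)) and the row is built as a block of fresh dicts followed by a block of Nones.
import Mathlib
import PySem

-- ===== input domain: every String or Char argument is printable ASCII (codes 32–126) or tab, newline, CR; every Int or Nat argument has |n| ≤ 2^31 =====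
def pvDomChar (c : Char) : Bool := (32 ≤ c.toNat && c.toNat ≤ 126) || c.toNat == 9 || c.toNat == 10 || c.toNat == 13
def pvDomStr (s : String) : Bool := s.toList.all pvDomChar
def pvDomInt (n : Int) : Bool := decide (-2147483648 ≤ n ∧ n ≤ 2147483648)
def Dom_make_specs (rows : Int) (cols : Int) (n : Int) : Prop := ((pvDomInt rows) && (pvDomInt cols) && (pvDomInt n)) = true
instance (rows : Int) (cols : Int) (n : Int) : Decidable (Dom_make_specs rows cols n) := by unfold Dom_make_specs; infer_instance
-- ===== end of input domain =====

-- B replaces the per-cell branch in A's nested loop by per-row boundary arithmetic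
-- (count = min(cols, max(0, n - i*cols + 1))) and builds each row as two blocks; same cost, different decomposition.


-- ===== PORT A =====
def make_specs (rows : Int) (cols : Int) (n : Int) : List (List (Option (List (String × Int)))) :=
  (PySem.List.pyRange 0 rows 1).foldl (fun specs i =>
    specs ++ [(PySem.List.pyRange 0 cols 1).foldl (fun auxi j =>
      auxi ++ [if i * cols + j ≤ n then some [] else none]) []]) []

-- ===== PORT B =====
def make_specs_alt (rows : Int) (cols : Int) (n : Int) : List (List (Option (List (String × Int)))) :=
  (PySem.List.pyRange 0 rows 1).map (fun i =>
    let count := min cols (max 0 (n - i * cols + 1))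
    List.replicate count.toNat (some []) ++ List.replicate (cols - count).toNat none)

-- ===== PRECONDITION & SPEC =====
def Spec_make_specs (rows : Int) (cols : Int) (n : Int) (out : List (List (Option (List (String × Int))))) : Prop := out = make_specs_alt rows cols n
instance (rows : Int) (cols : Int) (n : Int) (out : List (List (Option (List (String × Int))))) : Decidable (Spec_make_specs rows cols n out) := by unfold Spec_make_specs; infer_instance

-- ===== CLAIM (what is proved, stated in full; the proofs are below) =====
def Claim_equal_make_specs : Prop := ∀ (rows : Int) (cols : Int) (n : Int), Dom_make_specs rows cols n → Spec_make_specs rows cols n (make_specs rows cols n)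

-- ===== LEMMAS AND PROOFS =====

-- fold-with-append is map (specialised to singleton appends)
theorem foldl_append_singleton {α β : Type} (xs : List α) (f : α → β) (init : List β) :
    xs.foldl (fun acc x => acc ++ [f x]) init = init ++ xs.map f := by
  induction xs generalizing init with
  | nil => simp
  | cons x xs ih => simp [List.foldl, ih]

-- one row of A, as a map over the column range, equals B's two-block row
theorem row_eq (m : Nat) (b n : Int) :
    (PySem.List.pyRange 0 (m : Int) 1).map
        (fun j => if b + j ≤ n then (some [] : Option (List (String × Int))) else none)
      = List.replicate (min (m : Int) (max 0 (n - b + 1))).toNat (some [])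
          ++ List.replicate ((m : Int) - min (m : Int) (max 0 (n - b + 1))).toNat none := by
  induction m with
  | zero => simp
  | succ m ih =>
    rw [show ((m + 1 : Nat) : Int) = (m : Int) + 1 by push_cast; ring,
        PySem.List.pyRange_one_succ_right (by positivity), List.map_append, ih]
    by_cases hc : b + (m : Int) ≤ n
    · have h1 : min ((m : Int) + 1) (max 0 (n - b + 1)) = (m : Int) + 1 := by omega
      have h2 : min ((m : Int)) (max 0 (n - b + 1)) = (m : Int) := by omega
      have h3 : ((m : Int) + 1).toNat = (m : Int).toNat + 1 := by omega
      rw [h1, h2, h3, List.replicate_succ']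
      simp [hc]
    · have h1 : min ((m : Int) + 1) (max 0 (n - b + 1))
          = min ((m : Int)) (max 0 (n - b + 1)) := by omega
      have h2 : ((m : Int) + 1 - min ((m : Int)) (max 0 (n - b + 1))).toNat
          = ((m : Int) - min ((m : Int)) (max 0 (n - b + 1))).toNat + 1 := by omega
      rw [h1, h2, List.replicate_succ']
      simp [hc]

-- ===== VERDICT (by name: the statement is the Claim_ definition above) =====
theorem make_specs_spec : Claim_equal_make_specs := by
  intro rows cols n _
  unfold Spec_make_specs make_specs make_specs_alt
  rw [foldl_append_singleton, List.nil_append]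
  apply List.map_congr_left
  intro i _
  rw [foldl_append_singleton, List.nil_append]
  by_cases hc : 0 ≤ cols
  · have h := row_eq cols.toNat (i * cols) n
    rw [Int.toNat_of_nonneg hc] at h
    simpa [sub_add_eq_add_sub] using h
  · rw [PySem.List.pyRange_one_eq_nil (by omega)]
    have h1 : min cols (max 0 (n - i * cols + 1)) = cols := by omega
    simp [h1]
    omega
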